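-- pv_equiv track=rewrite | github.com/dengguojie/vue-element-admin | auto_schedule/python/tbe/dsl/unify_schedule/reduce_tilingcase.py | _get_pattern_key
-- ===== SOURCE A (Python) =====
-- def _get_pattern_key(_shape, _reduce_idx_list):
--     pattern_key = 0
--     length = len(_shape)
--     for i in range(length):
--         if i in _reduce_idx_list:
--             pattern_key += 2 * 2 ** (length - i - 1)
--         else:
--             pattern_key += 2 ** (length - i - 1)
--
--     return pattern_key
-- ===== SOURCE B (Python) =====
-- def _get_pattern_key(_shape, _reduce_idx_list):
--     length = len(_shape)
--     extra = sum(2 ** (length - i - 1)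
--                 for i in {i for i in _reduce_idx_list if 0 <= i < length})
--     return 2 ** length - 1 + extra
-- ===== Notes on version B (the rewrite author's own statement) =====
-- stated objective: faster
-- what changed: Instead of looping over every shape position and testing membership in the reduce list, B starts from the closed-form base 2**len - 1 (digit 1 everywhere) and adds one extra power of two per distinct in-range reduce index taken from a set comprehension over the reduce list.
import Mathlib
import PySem

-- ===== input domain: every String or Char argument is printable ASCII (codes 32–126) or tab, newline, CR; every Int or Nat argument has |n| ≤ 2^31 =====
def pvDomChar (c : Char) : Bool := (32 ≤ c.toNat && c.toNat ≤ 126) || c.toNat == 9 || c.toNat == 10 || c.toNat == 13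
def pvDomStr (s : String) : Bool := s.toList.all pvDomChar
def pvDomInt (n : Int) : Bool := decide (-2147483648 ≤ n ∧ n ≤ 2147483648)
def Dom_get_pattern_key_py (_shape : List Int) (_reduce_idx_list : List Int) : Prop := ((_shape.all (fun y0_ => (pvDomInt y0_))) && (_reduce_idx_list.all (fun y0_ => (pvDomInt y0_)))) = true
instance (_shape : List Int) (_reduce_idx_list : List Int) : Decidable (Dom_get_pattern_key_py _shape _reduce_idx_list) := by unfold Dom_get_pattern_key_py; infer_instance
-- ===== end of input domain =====

-- B replaces the per-position membership loop by a closed-form base (2^len - 1) plus one power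
-- per distinct in-range reduce index (objective: faster — one membership scan per reduce index instead of one per shape position).


-- ===== PORT A =====
-- loop 'for i in range(length)' accumulating pattern_key; exponent length-i-1 is ≥ 0 throughout
def get_pattern_key_py (_shape : List Int) (_reduce_idx_list : List Int) : Int :=
  (PySem.List.pyRange 0 (_shape.length : Int) 1).foldl
    (fun pattern_key i =>
      if i ∈ _reduce_idx_list then pattern_key + 2 * 2 ^ ((_shape.length : Int) - i - 1).toNat
      else pattern_key + 2 ^ ((_shape.length : Int) - i - 1).toNat) 0

-- ===== PORT B =====
-- base 2^length - 1 plus one power per distinct in-range reduce index (the set comprehension)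
def get_pattern_key_py_alt (_shape : List Int) (_reduce_idx_list : List Int) : Int :=
  let s : PySem.Set Int := PySem.Set.ofList
    (_reduce_idx_list.filter (fun i => decide (0 ≤ i ∧ i < (_shape.length : Int))))
  2 ^ _shape.length - 1 + (s.map (fun i => (2 : Int) ^ ((_shape.length : Int) - i - 1).toNat)).sum

-- ===== PRECONDITION & SPEC =====
def Spec_get_pattern_key_py (_shape : List Int) (_reduce_idx_list : List Int) (out : Int) : Prop := out = get_pattern_key_py_alt _shape _reduce_idx_list
instance (_shape : List Int) (_reduce_idx_list : List Int) (out : Int) : Decidable (Spec_get_pattern_key_py _shape _reduce_idx_list out) := by unfold Spec_get_pattern_key_py; infer_instance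

-- ===== CLAIM (what is proved, stated in full; the proofs are below) =====
def Claim_equal_get_pattern_key_py : Prop := ∀ (_shape : List Int) (_reduce_idx_list : List Int), Dom_get_pattern_key_py _shape _reduce_idx_list → Spec_get_pattern_key_py _shape _reduce_idx_list (get_pattern_key_py _shape _reduce_idx_list)

-- ===== LEMMAS AND PROOFS =====

-- A's loop over range(a, b) equals the base 2^(b-a) - 1 plus one extra power per reduce index in [a, b)
theorem loop_key (rl : List Int) (b : Int) (k : Nat) : ∀ a : Int, b - a = k →
    ((PySem.List.pyRange a b 1).map
      (fun i => if i ∈ rl then 2 * (2 : Int) ^ (b - i - 1).toNat else (2 : Int) ^ (b - i - 1).toNat)).sum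
    = (2 : Int) ^ k - 1 +
      (((PySem.List.pyRange a b 1).filter (fun i => decide (i ∈ rl))).map
        (fun i => (2 : Int) ^ (b - i - 1).toNat)).sum := by
  induction k with
  | zero =>
    intro a h
    rw [PySem.List.pyRange_one_eq_nil (by omega)]
    simp
  | succ k ih =>
    intro a h
    have hexp : (b - a - 1).toNat = k := by omega
    rw [PySem.List.pyRange_one_cons (by omega), List.map_cons, List.sum_cons,
        List.filter_cons, ih (a + 1) (by omega)]
    by_cases hm : a ∈ rl
    · rw [if_pos hm, if_pos (by simp [hm]), List.map_cons, List.sum_cons, hexp, pow_succ]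
      ring
    · rw [if_neg hm, if_neg (by simp [hm]), hexp, pow_succ]
      ring

-- ===== VERDICT (by name: the statement is the Claim_ definition above) =====
theorem get_pattern_key_py_spec : Claim_equal_get_pattern_key_py := by
  intro _shape rl _
  unfold Spec_get_pattern_key_py get_pattern_key_py get_pattern_key_py_alt
  -- turn A's foldl into a mapped sum
  have hfun : (fun (pattern_key : Int) (i : Int) =>
      if i ∈ rl then pattern_key + 2 * 2 ^ ((_shape.length : Int) - i - 1).toNat
      else pattern_key + 2 ^ ((_shape.length : Int) - i - 1).toNat)
      = (fun pattern_key i => pattern_key +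
          (if i ∈ rl then 2 * (2 : Int) ^ ((_shape.length : Int) - i - 1).toNat
           else 2 ^ ((_shape.length : Int) - i - 1).toNat)) := by
    funext pk i; split <;> rfl
  rw [hfun, PySem.List.foldl_add,
      loop_key rl (_shape.length : Int) _shape.length 0 (by omega), zero_add]
  -- the filtered range and B's set are permutations of one another
  have hperm : ((PySem.List.pyRange 0 (_shape.length : Int) 1).filter
        (fun i => decide (i ∈ rl))).Perm
      (PySem.Set.ofList (rl.filter (fun i => decide (0 ≤ i ∧ i < (_shape.length : Int))))) := by
    rw [List.perm_ext_iff_of_nodup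
      (List.Nodup.filter _ (PySem.List.nodup_pyRange_one _ _)) (PySem.Set.nodup_ofList _)]
    intro x
    simp [PySem.Set.mem_ofList, PySem.List.mem_pyRange_one, List.mem_filter]
    tauto
  rw [List.Perm.sum_eq (hperm.map _)]
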